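-- pv_equiv track=rewrite | github.com/RyugaXhypeR/aoc | 2025/python/day_03.py | find_max_n_digit_int
-- ===== SOURCE A (Python) =====
-- from functools import reduce
--
-- def find_max_n_digit_int(nums: list[int], n: int) -> int:
--     n_removeable_digits = len(nums) - n
--     stack = []
--
--     for num in nums:
--         while n_removeable_digits > 0 and stack and stack[-1] < num:
--             stack.pop()
--             n_removeable_digits -= 1
--         stack.append(num)
--
--     return reduce(lambda x, y: x * 10 + y, stack[:n])
-- ===== SOURCE B (Python) =====
-- from functools import reduce
--
--
-- def find_max_n_digit_int(nums: list[int], n: int) -> int: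
--     result = []
--     rest = nums
--     for remaining in range(min(n, len(nums)), 0, -1):
--         window = rest[: len(rest) - remaining + 1]
--         result.append(max(window))
--         rest = rest[window.index(result[-1]) + 1:]
--     return reduce(lambda x, y: x * 10 + y, result)
-- ===== Notes on version B (the rewrite author's own statement) =====
-- stated objective: alternative
-- what changed: Replaces the single monotonic-stack pass (pop smaller tops while removals remain) by a greedy selection loop: for each of the min(n, len(nums)) output positions it scans the allowable window of the remaining suffix for its leftmost maximum, emits it and continues just past it; the final reduce(x*10+y) step is kept.
-- outside the precondition, e.g. on find_max_n_digit_int([5, 3, 1], -1): A returns 53, B raises TypeError; on find_max_n_digit_int([7], 0): A raises TypeError, B raises TypeError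
import Mathlib
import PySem

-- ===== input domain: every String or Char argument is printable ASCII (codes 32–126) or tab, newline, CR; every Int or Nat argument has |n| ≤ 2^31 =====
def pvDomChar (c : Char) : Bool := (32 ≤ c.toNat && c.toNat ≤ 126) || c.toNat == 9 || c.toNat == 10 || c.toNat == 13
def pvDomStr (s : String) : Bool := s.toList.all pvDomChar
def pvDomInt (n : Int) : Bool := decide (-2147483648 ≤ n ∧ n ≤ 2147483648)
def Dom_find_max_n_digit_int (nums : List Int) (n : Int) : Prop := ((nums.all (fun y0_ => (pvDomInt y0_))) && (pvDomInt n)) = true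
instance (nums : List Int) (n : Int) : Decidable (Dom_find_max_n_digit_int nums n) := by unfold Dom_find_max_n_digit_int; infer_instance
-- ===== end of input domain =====

-- B replaces A's single monotonic-stack pass by n windowed leftmost-max scans over the remaining
-- suffix (a different decomposition of the same greedy; objective: alternative, no speed claim).

-- ===== PORT A =====
-- the Python stack is held head-first (head = stack[-1]); it is reversed before slicing
def find_popW (num k : Int) (stack : List Int) : Int × List Int :=
  match stack with
  | [] => (k, [])
  | top :: rest =>
    if 0 < k ∧ top < num then find_popW num (k - 1) rest else (k, top :: rest)

def find_runAux (nums : List Int) (st : Int × List Int) : Int × List Int :=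
  nums.foldl (fun p num =>
    let q := find_popW num p.1 p.2
    (q.1, num :: q.2)) st

def find_max_n_digit_int (nums : List Int) (n : Int) : Int :=
  let stack := ((find_runAux nums ((nums.length : Int) - n, [])).2).reverse
  match PySem.List.slice stack none (some n) with
  | [] => 0  -- reduce over an empty list raises TypeError in Python; excluded by Pre_
  | x :: t => t.foldl (fun x y => x * 10 + y) x

-- ===== PORT B =====
-- loop 'for remaining in range(n, 0, -1)': remaining = r + 1 at each step, counting down
def alt_loop (rest : List Int) (remaining : Nat) (result : List Int) : List Int :=
  match remaining with
  | 0 => result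
  | r + 1 =>
    let window := PySem.List.slice rest none (some ((rest.length : Int) - ((r : Int) + 1) + 1))
    let m := (PySem.List.max? window (fun y => y)).getD 0  -- max([]) raises ValueError; excluded by Pre_
    let j := (PySem.List.index? window m).getD 0
    alt_loop (PySem.List.slice rest (some ((j : Int) + 1)) none) r (result ++ [m])

def find_max_n_digit_int_alt (nums : List Int) (n : Int) : Int :=
  match alt_loop nums (min n (nums.length : Int)).toNat [] with
  | [] => 0  -- reduce over an empty list raises TypeError in Python; excluded by Pre_
  | x :: t => t.foldl (fun x y => x * 10 + y) x

-- ===== PRECONDITION & SPEC =====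
-- Pre_ excludes n ≤ 0 and empty nums: for n = 0 or empty nums A raises (reduce over an empty
-- slice, TypeError), and for negative n A's tail-dropping value is an accident of stack[:n]
-- slicing, where B's own loop runs zero times and its reduce over the empty result raises.
def Pre_find_max_n_digit_int (nums : List Int) (n : Int) : Prop :=
  1 ≤ n ∧ nums ≠ []
instance (nums : List Int) (n : Int) : Decidable (Pre_find_max_n_digit_int nums n) := by
  unfold Pre_find_max_n_digit_int; infer_instance

def pvWitness_find_max_n_digit_int : List Int × Int := ([3, 1, 4, 1, 5], 3)

def Spec_find_max_n_digit_int (nums : List Int) (n : Int) (out : Int) : Prop := out = find_max_n_digit_int_alt nums n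
instance (nums : List Int) (n : Int) (out : Int) : Decidable (Spec_find_max_n_digit_int nums n out) := by unfold Spec_find_max_n_digit_int; infer_instance

-- ===== CLAIM (what is proved, stated in full; the proofs are below) =====
def Claim_equal_find_max_n_digit_int : Prop := ∀ (nums : List Int) (n : Int), Dom_find_max_n_digit_int nums n → Pre_find_max_n_digit_int nums n → Spec_find_max_n_digit_int nums n (find_max_n_digit_int nums n)

-- ===== LEMMAS AND PROOFS =====

-- budget bookkeeping of one pop loop
theorem popW_budget (num k : Int) (st : List Int) :
    (find_popW num k st).1 = k - st.length + (find_popW num k st).2.length := by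
  induction st generalizing k with
  | nil => simp [find_popW]
  | cons t r ih =>
    by_cases hc : 0 < k ∧ t < num
    · simp only [find_popW, if_pos hc]
      rw [ih]
      simp
      omega
    · simp [find_popW, if_neg hc]

theorem popW_mem (num k : Int) (st : List Int) :
    ∀ x ∈ (find_popW num k st).2, x ∈ st := by
  induction st generalizing k with
  | nil => simp [find_popW]
  | cons t r ih =>
    by_cases hc : 0 < k ∧ t < num
    · simp only [find_popW, if_pos hc]
      intro x hx
      exact List.mem_cons_of_mem _ (ih _ x hx)
    · simp [find_popW, if_neg hc]

theorem popW_full (num k : Int) (st : List Int)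
    (hlt : ∀ x ∈ st, x < num) (hk : (st.length : Int) ≤ k) :
    find_popW num k st = (k - st.length, []) := by
  induction st generalizing k with
  | nil => simp [find_popW]
  | cons t r ih =>
    have h1 : 0 < k := by simp at hk; omega
    have hc : 0 < k ∧ t < num := ⟨h1, hlt t List.mem_cons_self⟩
    simp only [find_popW, if_pos hc]
    rw [ih (k - 1) (fun x hx => hlt x (List.mem_cons_of_mem _ hx)) (by simp at hk ⊢; omega)]
    simp
    omega

-- phase 1: processing p ++ [m] from (k, st), where everything seen so far is < m and the
-- budget covers it all, leaves exactly the stack [m] with budget k - |p| - |st|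
theorem runAux_phase1 (m : Int) (p : List Int) (k : Int) (st : List Int)
    (hp : ∀ x ∈ p, x < m) (hst : ∀ x ∈ st, x < m)
    (hk : (p.length : Int) + st.length ≤ k) :
    find_runAux (p ++ [m]) (k, st) = (k - p.length - st.length, [m]) := by
  induction p generalizing k st with
  | nil =>
    simp only [List.nil_append, find_runAux, List.foldl_cons, List.foldl_nil]
    rw [popW_full m k st hst (by simpa using hk)]
    simp
  | cons x rest ih =>
    simp only [find_runAux, List.cons_append, List.foldl_cons] at ih ⊢
    have hx : ∀ y ∈ x :: (find_popW x k st).2, y < m := by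
      intro y hy
      rcases List.mem_cons.mp hy with h | h
      · exact h ▸ hp x List.mem_cons_self
      · exact hst y (popW_mem x k st y h)
    have hb := popW_budget x k st
    rw [ih (find_popW x k st).1 (x :: (find_popW x k st).2)
        (fun y hy => hp y (List.mem_cons_of_mem _ hy)) hx
        (by simp at hk ⊢; omega)]
    simp at hk ⊢
    omega

-- a bottom element m is never popped while every element that could reach it is ≤ m
theorem popW_append_bottom (num k : Int) (st : List Int) (m : Int)
    (h : (find_popW num k st).2 = [] → 0 < (find_popW num k st).1 → num ≤ m) :
    find_popW num k (st ++ [m]) = ((find_popW num k st).1, (find_popW num k st).2 ++ [m]) := by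
  induction st generalizing k with
  | nil =>
    have hm : ¬ (0 < k ∧ m < num) := by
      rintro ⟨h1, h2⟩
      have := h rfl h1
      omega
    simp only [List.nil_append, find_popW, if_neg hm]
  | cons t r ih =>
    by_cases hc : 0 < k ∧ t < num
    · simp only [List.cons_append, find_popW, if_pos hc]
      refine ih (k - 1) ?_
      intro h2 h3
      apply h <;> simp only [find_popW, if_pos hc] <;> assumption
    · simp [find_popW, if_neg hc]

theorem runAux_bottom (m : Int) (l : List Int) (k : Int) (st : List Int)
    (h : ∀ (i : Nat) (x : Int), (i : Int) + st.length < k → l[i]? = some x → x ≤ m) :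
    find_runAux l (k, st ++ [m]) =
      ((find_runAux l (k, st)).1, (find_runAux l (k, st)).2 ++ [m]) := by
  induction l generalizing k st with
  | nil => simp [find_runAux]
  | cons num rest ih =>
    simp only [find_runAux, List.foldl_cons] at ih ⊢
    have hb := popW_budget num k st
    have hpop : find_popW num k (st ++ [m]) =
        ((find_popW num k st).1, (find_popW num k st).2 ++ [m]) := by
      apply popW_append_bottom
      intro h2 h3
      have hlt : ((0 : Nat) : Int) + st.length < k := by
        rw [h2] at hb
        simp at hb
        omega
      exact h 0 num hlt (by simp)
    rw [hpop]
    have hassoc : num :: ((find_popW num k st).2 ++ [m]) =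
        (num :: (find_popW num k st).2) ++ [m] := rfl
    rw [hassoc]
    refine ih (find_popW num k st).1 (num :: (find_popW num k st).2) ?_
    intro i x hi hx
    refine h (i + 1) x ?_ (by simpa using hx)
    simp only [List.length_cons] at hi
    push_cast at hi ⊢
    omega

-- with a non-positive budget nothing is ever popped
theorem popW_nonpos (num k : Int) (st : List Int) (hk : k ≤ 0) :
    find_popW num k st = (k, st) := by
  cases st with
  | nil => simp [find_popW]
  | cons t r =>
    have : ¬ (0 < k ∧ t < num) := by omega
    simp [find_popW, if_neg this]

theorem runAux_nonpos (l : List Int) (k : Int) (st : List Int) (hk : k ≤ 0) :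
    find_runAux l (k, st) = (k, l.reverse ++ st) := by
  induction l generalizing st with
  | nil => simp [find_runAux]
  | cons num rest ih =>
    simp only [find_runAux, List.foldl_cons, popW_nonpos num k st hk]
    simp only [find_runAux] at ih
    rw [ih (num :: st)]
    simp

-- result accumulator of alt_loop
theorem alt_loop_acc (l : List Int) (r : Nat) (acc : List Int) :
    alt_loop l r acc = acc ++ alt_loop l r [] := by
  induction r generalizing l acc with
  | zero => simp [alt_loop]
  | succ s ih =>
    simp only [alt_loop]
    conv_lhs => rw [ih]
    conv_rhs => rw [ih]
    simp

-- the central correspondence: the first r digits of A's stack are B's r windowed picks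
theorem main_corr (r : Nat) : ∀ (l : List Int), r ≤ l.length →
    (((find_runAux l ((l.length : Int) - r, [])).2).reverse).take r = alt_loop l r [] := by
  induction r with
  | zero => intro l _; simp [alt_loop]
  | succ s ih =>
    intro l hr
    -- B's window is the first (l.length - s) elements of l
    have hwin : PySem.List.slice l none (some ((l.length : Int) - ((s : Int) + 1) + 1)) =
        l.take (l.length - s) := by
      rw [show ((l.length : Int) - ((s : Int) + 1) + 1) = ((l.length - s : Nat) : Int) by omega]
      exact PySem.List.slice_to_natCast l (l.length - s)
    have hwlen : (l.take (l.length - s)).length = l.length - s := by simp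
    have hwne : l.take (l.length - s) ≠ [] := by
      intro hcon
      rw [hcon] at hwlen
      simp at hwlen
      omega
    obtain ⟨m, hm⟩ : ∃ m, PySem.List.max? (l.take (l.length - s)) (fun y => y) = some m := by
      rcases hopt : PySem.List.max? (l.take (l.length - s)) (fun y => y) with _ | m
      · exact absurd ((PySem.List.max?_eq_none_iff _ _).mp hopt) hwne
      · exact ⟨m, rfl⟩
    have hmem : m ∈ l.take (l.length - s) := PySem.List.max?_mem hm
    have hmax : ∀ y ∈ l.take (l.length - s), y ≤ m := fun y hy => PySem.List.max?_isMax hm y hy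
    obtain ⟨j, hj⟩ : ∃ j, PySem.List.index? (l.take (l.length - s)) m = some j := by
      rcases hopt : PySem.List.index? (l.take (l.length - s)) m with _ | j
      · exact absurd ((PySem.List.index?_eq_none_iff _ _).mp hopt) (by simp [hmem])
      · exact ⟨j, rfl⟩
    obtain ⟨hjlt, hwj, hbefore⟩ := PySem.List.getElem_of_index?_eq_some hj
    have hjL : j < l.length - s := hwlen ▸ hjlt
    -- decompose l at position j
    have hljm : l[j]'(by omega) = m := by
      rw [← hwj, List.getElem_take]
    have hdecomp : l = (l.take j ++ [m]) ++ l.drop (j + 1) := by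
      rw [List.append_assoc]
      rw [show l.take j ++ ([m] ++ l.drop (j+1)) = l.take j ++ (m :: l.drop (j+1)) from rfl]
      rw [← hljm, ← List.drop_eq_getElem_cons (by omega)]
      exact (List.take_append_drop j l).symm
    -- elements strictly before j are < m
    have hbef : ∀ x ∈ l.take j, x < m := by
      intro x hx
      obtain ⟨i, hi, hxi⟩ := List.mem_iff_getElem.mp hx
      have hij : i < j := by have h' := hi; simp at h'; omega
      have hxw : (l.take j)[i]'hi = (l.take (l.length - s))[i]'(by omega) := by
        rw [List.getElem_take, List.getElem_take]
      have hne : (l.take (l.length - s))[i]'(by omega) ≠ m := hbefore i (by omega)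
      have hle : (l.take (l.length - s))[i]'(by omega) ≤ m := hmax _ (List.getElem_mem _)
      rw [← hxi, hxw]
      omega
    have hjtake : (l.take j).length = j := by simp; omega
    -- A-side: run phase 1 then the inert-bottom phase
    have hA : ∀ K : Int, K = (l.length : Int) - ((s + 1 : Nat) : Int) →
        find_runAux l (K, []) =
        ((find_runAux (l.drop (j+1)) (((l.drop (j+1)).length : Int) - s, [])).1,
         (find_runAux (l.drop (j+1)) (((l.drop (j+1)).length : Int) - s, [])).2 ++ [m]) := by
      intro K hK
      conv_lhs => rw [hdecomp]
      simp only [find_runAux, List.foldl_append]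
      have h1 := runAux_phase1 m (l.take j) K []
        hbef (by simp) (by simp [hjtake]; omega)
      simp only [find_runAux] at h1
      rw [List.foldl_append] at h1
      rw [h1]
      have hbudget : K - ((l.take j).length : Int) - (([] : List Int).length : Int)
          = ((l.drop (j+1)).length : Int) - s := by
        simp [hjtake]
        omega
      rw [hbudget]
      have h2 := runAux_bottom m (l.drop (j+1)) (((l.drop (j+1)).length : Int) - s) []
        (by
          intro i x hi hx
          simp only [List.length_nil, Nat.cast_zero, add_zero] at hi
          have hlen : (l.drop (j+1)).length = l.length - (j+1) := by simp
          rw [hlen] at hi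
          have hiL : j + 1 + i < l.length - s := by
            push_cast [Nat.cast_sub (by omega : j + 1 ≤ l.length)] at hi
            omega
          rw [List.getElem?_drop] at hx
          have hxl : l[j + 1 + i]'(by omega) = x := by
            rw [List.getElem?_eq_some_iff] at hx
            obtain ⟨_, hx⟩ := hx
            exact hx
          have : x ∈ l.take (l.length - s) := by
            rw [← hxl]
            rw [show l[j + 1 + i]'(by omega) = (l.take (l.length - s))[j + 1 + i]'(by omega) by
              rw [List.getElem_take]]
            exact List.getElem_mem _
          exact hmax x this)
      simp only [find_runAux, List.nil_append] at h2
      exact h2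
    rw [hA ((l.length : Int) - ((s + 1 : Nat) : Int)) rfl]
    -- B-side: unfold one step of alt_loop
    have hB : alt_loop l (s + 1) [] = m :: alt_loop (l.drop (j + 1)) s [] := by
      simp only [alt_loop, hwin, hm, Option.getD_some, hj]
      rw [show PySem.List.slice l (some ((j : Int) + 1)) none = l.drop (j + 1) by
        rw [show ((j : Int) + 1) = (((j + 1 : Nat) : Int)) by push_cast; ring]
        rw [PySem.List.slice_from _ (by positivity)]
        simp]
      rw [alt_loop_acc]
      simp
    rw [hB]
    simp only [List.reverse_append, List.reverse_cons, List.reverse_nil, List.nil_append,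
      List.cons_append, List.take_succ_cons]
    rw [ih (l.drop (j+1)) (by simp; omega)]

-- ===== VERDICT (by name: the statement is the Claim_ definition above) =====
theorem find_max_n_digit_int_spec : Claim_equal_find_max_n_digit_int := by
  unfold Claim_equal_find_max_n_digit_int
  intro nums n _ hpre
  obtain ⟨h1, hne⟩ := hpre
  unfold Spec_find_max_n_digit_int
  simp only [find_max_n_digit_int, find_max_n_digit_int_alt]
  by_cases hle : n ≤ (nums.length : Int)
  · rw [min_eq_left hle]
    have hr : n.toNat ≤ nums.length := by omega
    have hlist : PySem.List.slice ((find_runAux nums ((nums.length : Int) - n, [])).2.reverse)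
        none (some n) = alt_loop nums n.toNat [] := by
      rw [PySem.List.slice_to _ (by omega : (0:Int) ≤ n)]
      rw [show ((nums.length : Int) - n) = ((nums.length : Int) - ((n.toNat : Nat) : Int)) by omega]
      exact main_corr n.toNat nums hr
    rw [hlist]
  · replace hle : (nums.length : Int) < n := by omega
    rw [min_eq_right (by omega : (nums.length : Int) ≤ n), Int.toNat_natCast]
    have hA2 : (find_runAux nums ((nums.length : Int) - n, [])).2.reverse = nums := by
      rw [runAux_nonpos nums ((nums.length : Int) - n) [] (by omega)]
      simp
    have hB2 : alt_loop nums nums.length [] = nums := by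
      have hmc := main_corr nums.length nums le_rfl
      rw [runAux_nonpos nums ((nums.length : Int) - ((nums.length : Nat) : Int)) [] (by omega)] at hmc
      simp at hmc
      exact hmc.symm
    rw [hA2, hB2, PySem.List.slice_to _ (by omega : (0:Int) ≤ n)]
    rw [List.take_of_length_le (by omega)]
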